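-- pv_equiv track=rewrite | github.com/leozaow/leoscripts | app.py | desembaralhar_string
-- ===== SOURCE A (Python) =====
-- def desembaralhar_string(str):
--     deslocamento1 = 3
--     deslocamento2 = 2
--     desembaralhado = ""
--     for i, char in enumerate(str, start=1):
--         if i <= 10:
--             desembaralhadoChar = chr(ord(char) - deslocamento1)
--         else:
--             desembaralhadoChar = chr(ord(char) - deslocamento2)
--         desembaralhado += desembaralhadoChar
--     return desembaralhado
-- ===== SOURCE B (Python) =====
-- def desembaralhar_string(str):
--     # Stage 1: shift every character uniformly by -2.
--     chars = [chr(ord(c) - 2) for c in str]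
--     # Stage 2: correct the first min(10, len) characters by one more step in place.
--     for i in range(min(10, len(chars))):
--         chars[i] = chr(ord(chars[i]) - 1)
--     return ''.join(chars)
-- ===== Notes on version B (the rewrite author's own statement) =====
-- stated objective: alternative
-- what changed: Instead of choosing a shift per character with an indexed conditional, B shifts the whole string uniformly by -2 in one pass and then applies an in-place -1 correction pass to the first min(10, len) positions of the mutable list, joining once at the end.
import Mathlib
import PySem

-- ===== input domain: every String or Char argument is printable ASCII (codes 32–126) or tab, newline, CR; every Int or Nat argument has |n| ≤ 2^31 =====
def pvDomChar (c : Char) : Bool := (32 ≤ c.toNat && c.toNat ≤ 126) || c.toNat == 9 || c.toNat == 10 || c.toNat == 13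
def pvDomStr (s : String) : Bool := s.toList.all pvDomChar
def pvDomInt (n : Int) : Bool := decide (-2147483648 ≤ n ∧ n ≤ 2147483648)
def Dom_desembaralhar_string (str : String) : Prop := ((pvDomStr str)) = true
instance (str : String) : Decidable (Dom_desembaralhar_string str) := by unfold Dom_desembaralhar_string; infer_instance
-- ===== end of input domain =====

-- B replaces A's single conditional pass by a uniform shift-by-2 pass followed by an in-place -1 correction pass over the first min(10, len) positions (objective: alternative decomposition).


-- ===== PORT A =====
-- the for-loop with enumerate(str, start=1), carried as recursion over the chars with the 1-based counter i
def pvALoop (i : Nat) : List Char → List Char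
  | [] => []
  | c :: rest =>
    (if i ≤ 10 then Char.ofNat (c.toNat - 3) else Char.ofNat (c.toNat - 2)) :: pvALoop (i + 1) rest

def desembaralhar_string (str : String) : String :=
  String.ofList (pvALoop 1 str.toList)

-- ===== PORT B =====
-- stage 1: uniform shift by -2; stage 2: in-place -1 correction of the first min(10, len) positions
def pvBFix (chars : List Char) : List Char :=
  (List.range (min 10 chars.length)).foldl
    (fun l i => l.set i (Char.ofNat ((l.getD i default).toNat - 1))) chars

def desembaralhar_string_alt (str : String) : String :=
  String.ofList (pvBFix (str.toList.map (fun c => Char.ofNat (c.toNat - 2))))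

-- ===== PRECONDITION & SPEC =====
def Spec_desembaralhar_string (str : String) (out : String) : Prop := out = desembaralhar_string_alt str
instance (str : String) (out : String) : Decidable (Spec_desembaralhar_string str out) := by unfold Spec_desembaralhar_string; infer_instance

-- ===== CLAIM (what is proved, stated in full; the proofs are below) =====
def Claim_equal_desembaralhar_string : Prop := ∀ (str : String), Dom_desembaralhar_string str → Spec_desembaralhar_string str (desembaralhar_string str)

-- ===== LEMMAS AND PROOFS =====
theorem pvALoop_split (l : List Char) : ∀ (i : Nat), pvALoop (i + 1) l =
    (l.take (10 - i)).map (fun c => Char.ofNat (c.toNat - 3)) ++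
    (l.drop (10 - i)).map (fun c => Char.ofNat (c.toNat - 2)) := by
  induction l with
  | nil => intro i; simp [pvALoop]
  | cons c rest ih =>
    intro i
    by_cases h : i < 10
    · have h10 : 10 - i = (10 - (i + 1)) + 1 := by omega
      simp [pvALoop, h10, Nat.succ_le_of_lt h, ih (i + 1)]
    · have h10 : 10 - i = 0 := by omega
      have h10' : 10 - (i + 1) = 0 := by omega
      have : ¬ (i + 1 ≤ 10) := by omega
      simp [pvALoop, h10, this, ih (i + 1), h10']

-- the correction foldl rewrites exactly the first n positions by the -1 shift
theorem pvFix_eq (l : List Char) (n : Nat) (hn : n ≤ l.length) :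
    (List.range n).foldl (fun l i => l.set i (Char.ofNat ((l.getD i default).toNat - 1))) l =
    (l.take n).map (fun c => Char.ofNat (c.toNat - 1)) ++ l.drop n := by
  induction n with
  | zero => simp
  | succ k ih =>
    have hk : k ≤ l.length := by omega
    have hkl : k < l.length := by omega
    rw [List.range_succ, List.foldl_append, ih hk]
    simp only [List.foldl_cons, List.foldl_nil, List.map_take]
    set f : Char → Char := fun c => Char.ofNat (c.toNat - 1) with hf
    have hml : k ≤ (l.map f).length := by simpa using hk
    have hlen : ((l.map f).take k).length = k := by simp; omega
    have hgd : (((l.map f).take k) ++ l.drop k).getD k default = l[k] := by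
      unfold List.getD
      rw [List.getElem?_append_right (le_of_eq hlen), hlen, Nat.sub_self,
        List.getElem?_drop, Nat.add_zero, List.getElem?_eq_getElem hkl]
      rfl
    rw [hgd, List.set_append_right _ _ (le_of_eq hlen), hlen, Nat.sub_self]
    rw [show l.drop k = l[k] :: l.drop (k + 1) from List.drop_eq_getElem_cons hkl]
    simp [List.take_add_one, List.getElem?_eq_getElem hkl, hf]
    rw [List.drop_eq_getElem_cons hkl, List.set_cons_zero]

-- shifting by 2 then by 1 equals shifting by 3 on domain characters
theorem char_shift (c : Char) (hc : pvDomChar c = true) :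
    Char.ofNat ((Char.ofNat (c.toNat - 2)).toNat - 1) = Char.ofNat (c.toNat - 3) := by
  simp only [pvDomChar, Bool.or_eq_true, Bool.and_eq_true, decide_eq_true_eq, beq_iff_eq] at hc
  have hv : Nat.isValidChar (c.toNat - 2) := Or.inl (by omega)
  rw [Char.toNat_ofNat, if_pos hv, Nat.sub_sub]

-- taking min n (length) is the same as taking n
theorem take_min_self {α : Type} (l : List α) (n : Nat) : l.take (min n l.length) = l.take n := by
  rcases Nat.le_total n l.length with h | h
  · rw [Nat.min_eq_left h]
  · rw [Nat.min_eq_right h, List.take_length, List.take_of_length_le h]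

theorem drop_min_self {α : Type} (l : List α) (n : Nat) : l.drop (min n l.length) = l.drop n := by
  rcases Nat.le_total n l.length with h | h
  · rw [Nat.min_eq_left h]
  · rw [Nat.min_eq_right h, List.drop_length, List.drop_eq_nil_of_le h]

-- ===== VERDICT (by name: the statement is the Claim_ definition above) =====
theorem desembaralhar_string_spec : Claim_equal_desembaralhar_string := by
  intro str hdom
  unfold Spec_desembaralhar_string desembaralhar_string desembaralhar_string_alt pvBFix
  have hA := pvALoop_split str.toList 0
  simp only [Nat.sub_zero] at hA
  rw [hA]
  set l := str.toList with hl
  have hall : ∀ c ∈ l, pvDomChar c = true := fun c hc => List.all_eq_true.mp hdom c hc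
  set m := l.map (fun c => Char.ofNat (c.toNat - 2)) with hm
  have hn : min 10 m.length ≤ m.length := Nat.min_le_right _ _
  rw [pvFix_eq m _ hn]
  have hml : m.length = l.length := by rw [hm, List.length_map]
  have htake : m.take (min 10 m.length) = (l.take 10).map (fun c => Char.ofNat (c.toNat - 2)) := by
    rw [take_min_self, hm, List.map_take]
  have hdrop : m.drop (min 10 m.length) = (l.drop 10).map (fun c => Char.ofNat (c.toNat - 2)) := by
    rw [drop_min_self, hm, List.map_drop]
  rw [htake, hdrop, List.map_map]
  congr 2
  apply List.map_congr_left
  intro c hc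
  simp only [Function.comp_apply]
  exact (char_shift c (hall c (List.mem_of_mem_take hc))).symm
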